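-- pv_equiv track=rewrite | github.com/pypi-data/pypi-mirror-139 | packages/ldapserver/ldapserver-0.1.2.tar.gz/ldapserver-0.1.2/ldapserver/schema/matching_rules.py | _substr_match
-- ===== SOURCE A (Python) =====
-- def _substr_match(attribute_value, inital_substring, any_substrings, final_substring):
-- 	if inital_substring:
-- 		if not attribute_value.startswith(inital_substring):
-- 			return False
-- 		attribute_value = attribute_value[len(inital_substring):]
-- 	if final_substring:
-- 		if not attribute_value.endswith(final_substring):
-- 			return False
-- 		attribute_value = attribute_value[:-len(final_substring)]
-- 	for substring in any_substrings:
-- 		index = attribute_value.find(substring)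
-- 		if index == -1:
-- 			return False
-- 		attribute_value = attribute_value[index+len(substring):]
-- 	return True
-- ===== SOURCE B (Python) =====
-- def _substr_match(attribute_value, inital_substring, any_substrings, final_substring):
-- 	# Declarative backtracking: fix the window once, then try EVERY placement
-- 	# position for each middle part (existential search), instead of greedy find+strip.
-- 	hi = len(attribute_value) - len(final_substring)
-- 	if hi < len(inital_substring):
-- 		return False
-- 	if not attribute_value.startswith(inital_substring) or not attribute_value.endswith(final_substring):
-- 		return False
-- 	def placeable(i, parts):
-- 		if not parts:
-- 			return True
-- 		s = parts[0]
-- 		return any(attribute_value[j:j + len(s)] == s and placeable(j + len(s), parts[1:])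
-- 		           for j in range(i, hi - len(s) + 1))
-- 	return placeable(len(inital_substring), any_substrings)
-- ===== Notes on version B (the rewrite author's own statement) =====
-- stated objective: alternative
-- what changed: A greedily strips the prefix/suffix and consumes each middle substring at its leftmost find, re-slicing the string as it goes; B fixes the [len(initial), n-len(final)) window once and answers by existential backtracking: for each middle part it tries every placement position in the window (any over range with a recursive sub-check), never slicing the remainder; equal because greedy leftmost placement is complete for ordered non-overlapping substrings.
import Mathlib
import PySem

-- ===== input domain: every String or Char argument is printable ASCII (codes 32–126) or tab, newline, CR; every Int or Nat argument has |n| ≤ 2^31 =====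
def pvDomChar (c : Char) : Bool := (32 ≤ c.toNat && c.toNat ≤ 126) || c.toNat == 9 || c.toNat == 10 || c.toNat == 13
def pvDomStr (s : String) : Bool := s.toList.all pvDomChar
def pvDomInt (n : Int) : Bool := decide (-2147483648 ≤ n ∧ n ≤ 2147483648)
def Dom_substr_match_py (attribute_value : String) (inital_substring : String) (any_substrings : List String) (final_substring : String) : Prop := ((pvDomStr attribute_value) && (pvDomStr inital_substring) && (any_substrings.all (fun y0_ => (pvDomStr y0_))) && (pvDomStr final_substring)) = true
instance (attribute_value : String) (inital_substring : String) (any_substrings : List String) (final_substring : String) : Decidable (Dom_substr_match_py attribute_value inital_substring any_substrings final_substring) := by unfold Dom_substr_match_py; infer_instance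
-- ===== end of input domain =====

-- B replaces A's greedy leftmost find-and-strip loop by a fixed window plus an
-- existential backtracking search over all placement positions for the middle parts
-- (objective: alternative); equal because greedy leftmost placement is complete.

-- ===== PORT A =====
-- the 'for substring in any_substrings' loop of A, carrying the shrinking string
def pvLoopA : String → List String → Bool
  | _, [] => true
  | av, s :: rest =>
      let index := PySem.Str.find av s
      if index = -1 then false
      else pvLoopA (PySem.Str.slice av (some (index + PySem.Str.len s)) none) rest

-- A's code after the inital_substring block (final_substring check, then the loop)
def pvFinalA (av : String) (anys : List String) (fin : String) : Bool :=
  if fin ≠ "" then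
    if ¬ PySem.Str.endswith av fin then false
    else pvLoopA (PySem.Str.slice av none (some (-(PySem.Str.len fin)))) anys
  else pvLoopA av anys

def substr_match_py (attribute_value : String) (inital_substring : String) (any_substrings : List String) (final_substring : String) : Bool :=
  if inital_substring ≠ "" then
    if ¬ PySem.Str.startswith attribute_value inital_substring then false
    else pvFinalA (PySem.Str.slice attribute_value (some (PySem.Str.len inital_substring)) none) any_substrings final_substring
  else pvFinalA attribute_value any_substrings final_substring

-- ===== PORT B =====
-- B's recursive 'placeable(i, parts)': try EVERY position j in [i, hi-len(s)+1)
-- for the first part, check the window slice there, and recurse on the rest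
def pvPlaceable (av : String) (hi : Int) : List String → Int → Bool
  | [], _ => true
  | s :: rest, i =>
      (PySem.List.pyRange i (hi - PySem.Str.len s + 1) 1).any
        (fun j => (PySem.Str.slice av (some j) (some (j + PySem.Str.len s)) == s)
                  && pvPlaceable av hi rest (j + PySem.Str.len s))

def substr_match_py_alt (attribute_value : String) (inital_substring : String) (any_substrings : List String) (final_substring : String) : Bool :=
  let hi := PySem.Str.len attribute_value - PySem.Str.len final_substring
  if hi < PySem.Str.len inital_substring then false
  else if ¬ PySem.Str.startswith attribute_value inital_substring ∨ ¬ PySem.Str.endswith attribute_value final_substring then false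
  else pvPlaceable attribute_value hi any_substrings (PySem.Str.len inital_substring)

-- ===== PRECONDITION & SPEC =====
def Spec_substr_match_py (attribute_value : String) (inital_substring : String) (any_substrings : List String) (final_substring : String) (out : Bool) : Prop := out = substr_match_py_alt attribute_value inital_substring any_substrings final_substring
instance (attribute_value : String) (inital_substring : String) (any_substrings : List String) (final_substring : String) (out : Bool) : Decidable (Spec_substr_match_py attribute_value inital_substring any_substrings final_substring out) := by unfold Spec_substr_match_py; infer_instance

-- ===== CLAIM (what is proved, stated in full; the proofs are below) =====
def Claim_equal_substr_match_py : Prop := ∀ (attribute_value : String) (inital_substring : String) (any_substrings : List String) (final_substring : String), Dom_substr_match_py attribute_value inital_substring any_substrings final_substring → Spec_substr_match_py attribute_value inital_substring any_substrings final_substring (substr_match_py attribute_value inital_substring any_substrings final_substring)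

-- ===== LEMMAS AND PROOFS =====

-- B's window-slice test at a nonnegative position is 'occurrence of s at j'
lemma pvSliceCheck (av s : String) (j : Int) (hj : 0 ≤ j) :
    ((PySem.Str.slice av (some j) (some (j + PySem.Str.len s)) == s) = true) ↔
      s.toList <+: av.toList.drop j.toNat := by
  have hlen : 0 ≤ PySem.Str.len s := by rw [PySem.Str.len_eq]; omega
  have htl : (PySem.Str.slice av (some j) (some (j + PySem.Str.len s))).toList
      = (av.toList.drop j.toNat).take s.toList.length := by
    rw [PySem.Str.toList_slice, PySem.Chars.slice_eq_listSlice,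
        PySem.List.slice_toNat _ hj (by omega)]
    congr 1
    rw [PySem.Str.len_eq]
    omega
  constructor
  · intro h
    have : (PySem.Str.slice av (some j) (some (j + PySem.Str.len s))) = s := beq_iff_eq.mp h
    have hl : s.toList = (av.toList.drop j.toNat).take s.toList.length := by
      rw [← htl, this]
    exact List.prefix_iff_eq_take.mpr hl
  · intro h
    apply beq_iff_eq.mpr
    apply String.ext
    show (PySem.Str.slice av (some j) (some (j + PySem.Str.len s))).toList = s.toList
    rw [htl, ← List.prefix_iff_eq_take.mp h]

-- the existential search is monotone: a later start can only fail more
lemma pvPlaceable_mono (av : String) (hi : Int) (subs : List String) (i i' : Int)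
    (h : i' ≤ i) (hp : pvPlaceable av hi subs i = true) :
    pvPlaceable av hi subs i' = true := by
  cases subs with
  | nil => rfl
  | cons s rest =>
    simp only [pvPlaceable, List.any_eq_true, PySem.List.mem_pyRange_one] at hp ⊢
    obtain ⟨j, ⟨hj1, hj2⟩, hj3⟩ := hp
    exact ⟨j, ⟨by omega, hj2⟩, hj3⟩

-- within the window, A's greedy leftmost loop equals B's exhaustive search
lemma pvLoop_eq (subs : List String) (av : String) (hi : Nat) (hhi : hi ≤ av.toList.length) :
    ∀ (av' : String) (lo : Nat), av'.toList = (av.toList.take hi).drop lo → lo ≤ hi →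
      pvLoopA av' subs = pvPlaceable av (hi : Int) subs (lo : Int) := by
  induction subs with
  | nil => intro av' lo _ _; rfl
  | cons s rest ih =>
    intro av' lo h1 hlo
    set M := (av.toList.take hi).drop lo with hM
    have hMlen : M.length = hi - lo := by
      simp only [hM, List.length_drop, List.length_take]; omega
    have hfind : PySem.Str.find av' s = PySem.Chars.find M s.toList := by
      rw [PySem.Str.find_eq, h1]
    have hMdrop : ∀ k : Nat, M.drop k = (av.toList.drop (lo + k)).take (hi - (lo + k)) := by
      intro k
      rw [hM, List.drop_drop, List.drop_take]
    have hwin : ∀ k : Nat, lo ≤ k → k + s.toList.length ≤ hi →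
        (s.toList <+: M.drop (k - lo) ↔ s.toList <+: av.toList.drop k) := by
      intro k hk1 hk2
      rw [hMdrop, show lo + (k - lo) = k by omega]
      constructor
      · exact fun h => (List.prefix_take_iff.mp h).1
      · exact fun h => List.prefix_take_iff.mpr ⟨h, by omega⟩
    simp only [pvLoopA, pvPlaceable, hfind]
    by_cases h0 : PySem.Chars.find M s.toList = -1
    · rw [if_pos h0]
      have hno : ¬ s.toList <:+: M := (PySem.Chars.find_eq_neg_one_iff M s.toList).mp h0
      symm
      rw [List.any_eq_false]
      intro j hj
      rw [PySem.List.mem_pyRange_one] at hj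
      obtain ⟨hj1, hj2⟩ := hj
      have hsl : 0 ≤ PySem.Str.len s := by rw [PySem.Str.len_eq]; omega
      have hj0 : 0 ≤ j := by omega
      have hjb : j.toNat + s.toList.length ≤ hi := by
        rw [PySem.Str.len_eq] at hj2 hsl
        omega
      have hjl : lo ≤ j.toNat := by omega
      simp only [Bool.and_eq_true, not_and]
      intro hchk _
      have hocc := (pvSliceCheck av s j hj0).mp hchk
      have hpre : s.toList <+: M.drop (j.toNat - lo) := (hwin j.toNat hjl hjb).mpr hocc
      exact hno ((PySem.Chars.isIn_iff_infix s.toList M).mp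
        ((PySem.Chars.exists_prefix_drop_iff_isIn s.toList M).mp ⟨_, hpre⟩))
    · rw [if_neg h0]
      set r := PySem.Chars.find M s.toList with hr
      have hr0 : 0 ≤ r := by
        have := PySem.Chars.neg_one_le_find M s.toList
        omega
      obtain ⟨hrpre, hrmin⟩ := PySem.Chars.find_spec (s := M) (sub := s.toList) hr0
      have hrl2 : r ≤ (M.length : Int) := PySem.Chars.find_le_length M s.toList
      have hrlen : lo + (r.toNat + s.toList.length) ≤ hi := by
        have hx := hrpre.length_le
        rw [List.length_drop, hMlen] at hx
        rw [hMlen] at hrl2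
        omega
      have hslice : (PySem.Str.slice av' (some (r + PySem.Str.len s)) none).toList
          = (av.toList.take hi).drop (lo + (r.toNat + s.toList.length)) := by
        rw [PySem.Str.toList_slice, PySem.Chars.slice_eq_listSlice,
            PySem.List.slice_from av'.toList (by rw [PySem.Str.len_eq]; omega),
            h1, hM, List.drop_drop]
        congr 1
        rw [PySem.Str.len_eq]
        omega
      rw [ih _ (lo + (r.toNat + s.toList.length)) hslice (by omega)]
      rw [Bool.eq_iff_iff, List.any_eq_true]
      constructor
      · intro hrest
        refine ⟨(lo : Int) + r, ?_, ?_⟩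
        · rw [PySem.List.mem_pyRange_one, PySem.Str.len_eq]
          omega
        · have hj0 : (0:Int) ≤ (lo : Int) + r := by omega
          have hchk : ((PySem.Str.slice av (some ((lo:Int) + r)) (some ((lo:Int) + r + PySem.Str.len s)) == s) = true) := by
            rw [pvSliceCheck av s _ hj0]
            have : ((lo:Int) + r).toNat = lo + r.toNat := by omega
            rw [this]
            exact (hwin (lo + r.toNat) (by omega) (by omega)).mp
              (by rw [show lo + r.toNat - lo = r.toNat by omega]; exact hrpre)
          rw [Bool.and_eq_true]
          refine ⟨hchk, ?_⟩
          have : (lo : Int) + r + PySem.Str.len s = ((lo + (r.toNat + s.toList.length) : Nat) : Int) := by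
            rw [PySem.Str.len_eq]; push_cast; omega
          rw [this]
          exact hrest
      · rintro ⟨j, hjmem, hjchk⟩
        rw [PySem.List.mem_pyRange_one] at hjmem
        obtain ⟨hj1, hj2⟩ := hjmem
        rw [Bool.and_eq_true] at hjchk
        obtain ⟨hchk, hrest⟩ := hjchk
        have hsl : 0 ≤ PySem.Str.len s := by rw [PySem.Str.len_eq]; omega
        have hj0 : 0 ≤ j := by omega
        have hjb : j.toNat + s.toList.length ≤ hi := by
          rw [PySem.Str.len_eq] at hj2 hsl
          omega
        have hocc := (pvSliceCheck av s j hj0).mp hchk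
        have hpre : s.toList <+: M.drop (j.toNat - lo) := (hwin j.toNat (by omega) hjb).mpr hocc
        have hrle : r.toNat ≤ j.toNat - lo := by
          by_contra hc
          exact hrmin _ (by omega) hpre
        apply pvPlaceable_mono av (hi:Int) rest (j + PySem.Str.len s)
        · rw [PySem.Str.len_eq]
          push_cast
          omega
        · exact hrest

-- a suffix not longer than the kept tail survives dropping a prefix
lemma pvSuffix_drop_iff (f l : List Char) (k : Nat) (h : f.length + k ≤ l.length) :
    f <:+ l.drop k ↔ f <:+ l := by
  constructor
  · exact fun hf => hf.trans (List.drop_suffix k l)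
  · intro hf
    have hk : k + ((l.drop k).length - f.length) = l.length - f.length := by
      simp [List.length_drop]; omega
    rw [List.suffix_iff_eq_drop] at hf ⊢
    rw [List.drop_drop, hk]
    exact hf

-- A's code after the prefix block equals B's bound+suffix guard plus the search
lemma pvFinal_eq (av av1 : String) (anys : List String) (fin : String) (li : Nat)
    (h1 : av1.toList = av.toList.drop li) (hli : li ≤ av.toList.length) :
    pvFinalA av1 anys fin =
      (if ((av.toList.length : Int) - PySem.Str.len fin) < (li : Int) ∨ ¬ PySem.Str.endswith av fin then false
       else pvPlaceable av ((av.toList.length : Int) - PySem.Str.len fin) anys (li : Int)) := by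
  by_cases hf : fin = ""
  · subst hf
    have hend : PySem.Str.endswith av "" = true := by
      rw [PySem.Str.endswith_eq]
      exact (PySem.Chars.endswith_iff _ _).2 (by simp)
    have hloop := pvLoop_eq anys av av.toList.length (le_refl _) av1 li
      (by rw [h1, List.take_length]) hli
    have hlen0 : PySem.Str.len ("" : String) = 0 := by rw [PySem.Str.len_eq]; simp
    have hcond : ¬ (((av.toList.length : Int) - PySem.Str.len ("" : String) < (li : Int)) ∨ ¬ PySem.Str.endswith av "") := by
      rintro (h | h)
      · rw [hlen0] at h
        omega
      · exact h hend
    simp only [pvFinalA]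
    rw [if_neg (by simp : ¬ ("" : String) ≠ ""), if_neg hcond, hloop,
        show ((av.toList.length : Int) - PySem.Str.len ("" : String)) = ((av.toList.length : Nat) : Int) by rw [hlen0]; omega]
  · have hfl : fin.toList ≠ [] := fun h => hf (String.toList_eq_nil_iff.mp h)
    have hfin0 : 0 < fin.toList.length :=
      Nat.pos_of_ne_zero (fun h => hfl (List.length_eq_zero_iff.mp h))
    by_cases he : PySem.Str.endswith av fin = true
    · have hsufC : fin.toList <:+ av.toList :=
        (PySem.Chars.endswith_iff _ _).1 (by rwa [PySem.Str.endswith_eq] at he)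
      have hlf : fin.toList.length ≤ av.toList.length := hsufC.length_le
      by_cases hcmp : av.toList.length < li + fin.toList.length
      · -- region too short: A's endswith on the shortened string fails, B's bound check fails
        have he1 : ¬ PySem.Str.endswith av1 fin = true := by
          intro h
          have hx := ((PySem.Chars.endswith_iff _ _).1 (by rwa [PySem.Str.endswith_eq] at h)).length_le
          rw [h1, List.length_drop] at hx
          omega
        simp only [pvFinalA]
        rw [if_pos hf, if_pos (by simpa using he1),
            if_pos (Or.inl (by rw [PySem.Str.len_eq]; omega))]
      · have he1 : PySem.Str.endswith av1 fin = true := by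
          rw [PySem.Str.endswith_eq, h1]
          exact (PySem.Chars.endswith_iff _ _).2 ((pvSuffix_drop_iff _ _ _ (by omega)).2 hsufC)
        have hmid : (PySem.Str.slice av1 none (some (-(PySem.Str.len fin)))).toList
            = (av.toList.take (av.toList.length - fin.toList.length)).drop li := by
          rw [PySem.Str.toList_slice, PySem.Chars.slice_eq_listSlice, PySem.Str.len_eq,
              PySem.List.slice_to_neg_natCast _ _ hfin0, h1, List.drop_take]
          congr 1
          rw [List.length_drop]
          omega
        have hloop := pvLoop_eq anys av (av.toList.length - fin.toList.length) (by omega) _ li hmid (by omega)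
        have hcond : ¬ (((av.toList.length : Int) - PySem.Str.len fin < (li : Int)) ∨ ¬ PySem.Str.endswith av fin) := by
          rintro (h | h)
          · rw [PySem.Str.len_eq] at h
            omega
          · exact h he
        simp only [pvFinalA]
        rw [if_pos hf, if_neg (by simpa using he1), if_neg hcond,
            show ((av.toList.length : Int) - PySem.Str.len fin) = ((av.toList.length - fin.toList.length : Nat) : Int) by
              rw [PySem.Str.len_eq]; omega]
        exact hloop
    · -- av does not end with fin: both sides return false
      have he1 : ¬ PySem.Str.endswith av1 fin = true := fun h => he (by
        rw [PySem.Str.endswith_eq] at h ⊢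
        exact (PySem.Chars.endswith_iff _ _).2
          (((PySem.Chars.endswith_iff _ _).1 (h1 ▸ h)).trans (List.drop_suffix li av.toList)))
      simp only [pvFinalA]
      rw [if_pos hf, if_pos (by simpa using he1), if_pos (Or.inr (by simpa using he))]

-- ===== VERDICT (by name: the statement is the Claim_ definition above) =====
theorem substr_match_py_spec : Claim_equal_substr_match_py := by
  intro av init anys fin _hdom
  unfold Spec_substr_match_py
  by_cases hs : PySem.Str.startswith av init = true
  · have hsC : PySem.Chars.startswith av.toList init.toList = true := by
      rwa [PySem.Str.startswith_eq] at hs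
    have hpre : init.toList <+: av.toList := (PySem.Chars.startswith_iff _ _).1 hsC
    have hli : init.toList.length ≤ av.toList.length := hpre.length_le
    by_cases h0 : init = ""
    · subst h0
      have hfe := pvFinal_eq av av anys fin 0 (by simp) (by omega)
      simp only [substr_match_py, substr_match_py_alt]
      rw [if_neg (by simp : ¬ ("" : String) ≠ ""), hfe]
      simp only [hs, PySem.Str.len_eq]
      split_ifs <;> simp_all <;> omega
    · have hdropEq : (PySem.Str.slice av (some (PySem.Str.len init)) none).toList
          = av.toList.drop init.toList.length := by
        rw [PySem.Str.toList_slice, PySem.Chars.slice_eq_listSlice, PySem.Str.len_eq,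
            PySem.List.slice_from_natCast]
      have hfe := pvFinal_eq av _ anys fin init.toList.length hdropEq hli
      simp only [substr_match_py, substr_match_py_alt]
      rw [if_pos h0, if_neg (by simp [hsC]), hfe]
      simp only [hs, PySem.Str.len_eq]
      split_ifs <;> simp_all <;> omega
  · have h0 : init ≠ "" := by
      intro h
      subst h
      apply hs
      rw [PySem.Str.startswith_eq]
      exact (PySem.Chars.startswith_iff _ _).2 (by simp)
    simp only [substr_match_py, substr_match_py_alt]
    rw [if_pos h0, if_pos (by simpa using hs)]
    split_ifs with h1 h2
    · rfl
    · rfl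
    · exact absurd hs (by tauto)
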